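-- pv_equiv track=rewrite | github.com/jekmasto/Daily_GNSS_DL_Denoiser | Functions_for_animations.py | find_common_elements_with_indexes
-- ===== SOURCE A (Python) =====
-- def find_common_elements_with_indexes(array1, array2):
--
--     """
--     finds the common elements between two arrays and returns their corresponding indexes in both arrays
--     """
--
--     common_elements = []
--     common_indexes_array1 = []
--     common_indexes_array2 = []
--
--     for index1, element1 in enumerate(array1):
--         for index2, element2 in enumerate(array2):
--             if element1 == element2 and element1 not in common_elements:
--                 common_elements.append(element1)
--                 common_indexes_array1.append(index1)
--                 common_indexes_array2.append(index2)
--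
--     return common_elements, common_indexes_array1, common_indexes_array2
-- ===== SOURCE B (Python) =====
-- def find_common_elements_with_indexes(array1, array2):
--     """
--     finds the common elements between two arrays and returns their corresponding indexes in both arrays
--     """
--     first2 = {}
--     for j, v in enumerate(array2):
--         if v not in first2:
--             first2[v] = j
--     common_elements = []
--     common_indexes_array1 = []
--     common_indexes_array2 = []
--     seen = set()
--     for i, v in enumerate(array1):
--         if v not in seen and v in first2:
--             seen.add(v)
--             common_elements.append(v)
--             common_indexes_array1.append(i)
--             common_indexes_array2.append(first2[v])
--     return common_elements, common_indexes_array1, common_indexes_array2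
-- ===== Notes on version B (the rewrite author's own statement) =====
-- stated objective: faster
-- what changed: Replaced the nested scan of array2 inside the array1 loop (with a linear membership test on the growing result list) by a dict of first indexes of array2 built once plus a seen-set, giving a single pass over each array.
import Mathlib
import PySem

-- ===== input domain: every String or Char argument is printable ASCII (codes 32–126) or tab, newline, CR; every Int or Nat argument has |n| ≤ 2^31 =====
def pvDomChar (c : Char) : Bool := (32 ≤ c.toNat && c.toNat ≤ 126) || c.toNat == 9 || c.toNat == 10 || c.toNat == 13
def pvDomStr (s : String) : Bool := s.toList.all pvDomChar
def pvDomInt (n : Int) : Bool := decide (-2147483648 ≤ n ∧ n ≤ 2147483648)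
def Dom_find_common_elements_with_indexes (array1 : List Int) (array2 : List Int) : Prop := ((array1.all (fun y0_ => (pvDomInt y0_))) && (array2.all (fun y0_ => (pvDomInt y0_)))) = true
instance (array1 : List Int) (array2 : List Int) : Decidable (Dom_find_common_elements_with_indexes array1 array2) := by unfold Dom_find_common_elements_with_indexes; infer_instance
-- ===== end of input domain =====

-- B replaces A's nested scan of array2 (plus linear membership on the result list) by a
-- first-index dict over array2 and a seen-set: one pass over each array (objective: faster).

-- ===== PORT A =====
-- literal transliteration: nested enumerate loops, three appended lists, membership test on common_elements
def find_common_elements_with_indexes (array1 : List Int) (array2 : List Int) : List Int × List Int × List Int :=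
  (PySem.List.enumerate array1).foldl (fun s p =>
    (PySem.List.enumerate array2).foldl (fun s q =>
      if (q.2 == p.2) && !(s.1.contains p.2) then
        (s.1 ++ [p.2], s.2.1 ++ [p.1], s.2.2 ++ [q.1])
      else s) s)
    ([], [], [])

-- ===== PORT B =====
-- first2 : first index in array2 of each value (dict, insert only if key absent)
def pvFirst2 (array2 : List Int) : PySem.Dict Int Int :=
  (PySem.List.enumerate array2).foldl
    (fun d q => if d.contains q.2 then d else d.insert q.2 q.1) PySem.Dict.empty

def find_common_elements_with_indexes_alt (array1 : List Int) (array2 : List Int) : List Int × List Int × List Int :=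
  let first2 := pvFirst2 array2
  ((PySem.List.enumerate array1).foldl
    (fun (s : (List Int × List Int × List Int) × PySem.Set Int) p =>
      if !(PySem.Set.contains s.2 p.2) && first2.contains p.2 then
        ((s.1.1 ++ [p.2], s.1.2.1 ++ [p.1], s.1.2.2 ++ [first2.getD p.2 0]),  -- first2[v]: key present (guarded by contains)
         PySem.Set.add s.2 p.2)
      else s)
    (([], [], []), PySem.Set.empty)).1

-- ===== PRECONDITION & SPEC =====
def Spec_find_common_elements_with_indexes (array1 : List Int) (array2 : List Int) (out : List Int × List Int × List Int) : Prop := out = find_common_elements_with_indexes_alt array1 array2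
instance (array1 : List Int) (array2 : List Int) (out : List Int × List Int × List Int) : Decidable (Spec_find_common_elements_with_indexes array1 array2 out) := by unfold Spec_find_common_elements_with_indexes; infer_instance

-- ===== CLAIM (what is proved, stated in full; the proofs are below) =====
def Claim_equal_find_common_elements_with_indexes : Prop := ∀ (array1 : List Int) (array2 : List Int), Dom_find_common_elements_with_indexes array1 array2 → Spec_find_common_elements_with_indexes array1 array2 (find_common_elements_with_indexes array1 array2)

-- ===== LEMMAS AND PROOFS =====

-- the dict built by pvFirst2's loop: lookup = first pair of l with matching value, unless already in d
lemma first2_get? (l : List (Int × Int)) (d : PySem.Dict Int Int) (v : Int) :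
    (l.foldl (fun d q => if d.contains q.2 then d else d.insert q.2 q.1) d).get? v =
      if (d.get? v).isSome then d.get? v
      else (l.find? (fun q => q.2 == v)).map (·.1) := by
  induction l generalizing d with
  | nil =>
    rw [List.foldl_nil, List.find?_nil]
    cases h : d.get? v <;> simp
  | cons q l ih =>
    simp only [List.foldl_cons]
    by_cases hc : d.contains q.2 = true
    · rw [if_pos hc, ih]
      by_cases hv : q.2 = v
      · subst hv
        have hs : (d.get? q.2).isSome = true := by
          rw [← PySem.Dict.contains_eq_isSome_get?]; exact hc
        rw [if_pos hs, if_pos hs]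
      · rw [List.find?_cons_of_neg (by simp [hv])]
    · rw [if_neg hc, ih]
      by_cases hv : q.2 = v
      · subst hv
        have hn : d.get? q.2 = none := by
          rw [PySem.Dict.contains_eq_isSome_get?] at hc; simpa using hc
        have hi : (PySem.Dict.insert d q.2 q.1).get? q.2 = some q.1 :=
          PySem.Dict.get?_insert_self d q.2 q.1
        rw [hi, hn, List.find?_cons_of_pos (by simp)]
        simp
      · have hi : (PySem.Dict.insert d q.2 q.1).get? v = d.get? v := by
          rw [PySem.Dict.get?_insert]; simp [Ne.symm hv]
        rw [hi, List.find?_cons_of_neg (by simp [hv])]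

lemma pvFirst2_get? (array2 : List Int) (v : Int) :
    (pvFirst2 array2).get? v =
      ((PySem.List.enumerate array2).find? (fun q => q.2 == v)).map (·.1) := by
  unfold pvFirst2
  rw [first2_get?]
  simp [PySem.Dict.get?_empty]

-- A's inner loop over (enumerated) array2, for a fixed value v and index i
lemma innerA (l : List (Int × Int)) (v i : Int) (ce x y : List Int) :
    l.foldl (fun s q =>
        if (q.2 == v) && !(s.1.contains v) then
          (s.1 ++ [v], s.2.1 ++ [i], s.2.2 ++ [q.1])
        else s) (ce, x, y) =
      if ce.contains v then (ce, x, y)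
      else match l.find? (fun q => q.2 == v) with
        | some q => (ce ++ [v], x ++ [i], y ++ [q.1])
        | none => (ce, x, y) := by
  induction l generalizing ce x y with
  | nil =>
    rw [List.foldl_nil, List.find?_nil]
    simp
  | cons q l ih =>
    simp only [List.foldl_cons]
    by_cases hce : ce.contains v = true
    · rw [if_neg (by simp; intro _; simpa using hce), ih, if_pos hce, if_pos hce]
    · by_cases hv : q.2 = v
      · subst hv
        rw [if_pos (by simp [show q.2 ∉ ce by simpa using hce]), ih, if_pos (by simp),
          if_neg hce, List.find?_cons_of_pos (by simp)]
      · rw [if_neg (by simp [hv]), ih,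
          List.find?_cons_of_neg (by simp [hv])]

-- main loop correspondence: A's outer loop state equals the first component of B's,
-- given that membership in common_elements agrees with the seen-set
lemma mainLoop (array2 : List Int) (l1 : List (Int × Int)) (ce x y : List Int)
    (seen : PySem.Set Int)
    (hinv : ∀ v : Int, ce.contains v = PySem.Set.contains seen v) :
    l1.foldl (fun s p =>
        (PySem.List.enumerate array2).foldl (fun s q =>
          if (q.2 == p.2) && !(s.1.contains p.2) then
            (s.1 ++ [p.2], s.2.1 ++ [p.1], s.2.2 ++ [q.1])
          else s) s) (ce, x, y) =
      (l1.foldl (fun (s : (List Int × List Int × List Int) × PySem.Set Int) p =>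
        if !(PySem.Set.contains s.2 p.2) && (pvFirst2 array2).contains p.2 then
          ((s.1.1 ++ [p.2], s.1.2.1 ++ [p.1], s.1.2.2 ++ [(pvFirst2 array2).getD p.2 0]),
           PySem.Set.add s.2 p.2)
        else s) ((ce, x, y), seen)).1 := by
  induction l1 generalizing ce x y seen with
  | nil => simp
  | cons p l1 ih =>
    simp only [List.foldl_cons]
    rw [innerA]
    have hcont : (pvFirst2 array2).contains p.2 =
        ((PySem.List.enumerate array2).find? (fun q => q.2 == p.2)).isSome := by
      rw [PySem.Dict.contains_eq_isSome_get?, pvFirst2_get?]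
      simp
    by_cases hce : ce.contains p.2 = true
    · have hseen : PySem.Set.contains seen p.2 = true := by rw [← hinv]; exact hce
      simp only [hce, if_true, hseen, Bool.not_true, Bool.false_and]
      exact ih ce x y seen hinv
    · have hseen : PySem.Set.contains seen p.2 = false := by rw [← hinv]; simpa using hce
      simp only [hce, hseen, Bool.not_false, Bool.true_and]
      cases hfind : (PySem.List.enumerate array2).find? (fun q => q.2 == p.2) with
      | none =>
        have : (pvFirst2 array2).contains p.2 = false := by rw [hcont, hfind]; rfl
        simp only [this]
        exact ih ce x y seen hinv
      | some q =>
        have hc2 : (pvFirst2 array2).contains p.2 = true := by rw [hcont, hfind]; rfl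
        have hgd : (pvFirst2 array2).getD p.2 0 = q.1 := by
          rw [PySem.Dict.getD_eq_get?_getD, pvFirst2_get?, hfind]; rfl
        simp only [hc2, hgd, if_true]
        refine ih (ce ++ [p.2]) (x ++ [p.1]) (y ++ [q.1]) (PySem.Set.add seen p.2) ?_
        intro v
        by_cases hv : v = p.2
        · subst hv
          have hns : p.2 ∉ seen := by simpa [PySem.Set.contains] using hseen
          simp [PySem.Set.add, PySem.Set.contains, hns]
        · have h1 : (ce ++ [p.2]).contains v = ce.contains v := by
            simp [hv]
          have h2 : PySem.Set.contains (PySem.Set.add seen p.2) v = PySem.Set.contains seen v := by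
            simp [PySem.Set.add, PySem.Set.contains]
            split <;> simp [hv]
          rw [h1, h2, hinv]

-- ===== VERDICT (by name: the statement is the Claim_ definition above) =====
theorem find_common_elements_with_indexes_spec : Claim_equal_find_common_elements_with_indexes := by
  intro array1 array2 _
  unfold Spec_find_common_elements_with_indexes
  unfold find_common_elements_with_indexes find_common_elements_with_indexes_alt
  exact mainLoop array2 (PySem.List.enumerate array1) [] [] [] PySem.Set.empty
    (fun v => by simp [PySem.Set.empty, PySem.Set.contains])
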